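-- pv_equiv track=rewrite | github.com/TropicalWatermelon/datathon | simple-mcp/utils/workout_recommender.py | _find_line_for_key
-- ===== SOURCE A (Python) =====
-- from typing import Dict, Optional, Tuple, List
--
-- def _find_line_for_key(text: str, keys: List[str]) -> Optional[str]:
--     lines = [ln.strip() for ln in text.splitlines() if ln.strip()]
--     for ln in lines:
--         low = ln.lower()
--         for k in keys:
--             if k in low:
--                 return ln
--     return None
-- ===== SOURCE B (Python) =====
-- def _find_line_for_key(text, keys):
--     # Key-major search: for each key, find its earliest matching line index,
--     # keeping the minimum; answer is the line at the overall minimal index.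
--     lines = [ln.strip() for ln in text.splitlines() if ln.strip()]
--     lows = [ln.lower() for ln in lines]
--     best = len(lines)
--     for k in keys:
--         for i in range(best):
--             if k in lows[i]:
--                 best = i
--                 break
--     return lines[best] if best < len(lines) else None
-- ===== Notes on version B (the rewrite author's own statement) =====
-- stated objective: alternative
-- what changed: Replaces A's line-major scan (for each line, test every key) by a key-major scan that computes, per key, the earliest matching line index within a shrinking bound and returns the line at the overall minimal index.
import Mathlib
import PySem

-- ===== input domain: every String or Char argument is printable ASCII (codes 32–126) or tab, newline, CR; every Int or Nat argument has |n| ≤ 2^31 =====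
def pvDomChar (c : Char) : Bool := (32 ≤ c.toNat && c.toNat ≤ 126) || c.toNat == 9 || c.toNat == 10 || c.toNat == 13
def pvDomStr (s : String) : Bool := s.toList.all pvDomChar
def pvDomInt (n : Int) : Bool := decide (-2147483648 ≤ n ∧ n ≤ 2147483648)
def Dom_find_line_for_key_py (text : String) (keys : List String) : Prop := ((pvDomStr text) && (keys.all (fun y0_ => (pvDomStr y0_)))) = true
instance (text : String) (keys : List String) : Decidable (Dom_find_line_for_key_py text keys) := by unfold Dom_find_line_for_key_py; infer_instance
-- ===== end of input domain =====

-- B replaces A's line-major scan by a key-major scan keeping the minimal matching line index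
-- (objective: alternative algorithm, similar cost); both are total, return value only.

-- ===== PORT A =====
-- inner loop: 'for k in keys: if k in low: return ln' (as a Bool: did some key match?)
def pvAnyKeyIn (keys : List String) (low : String) : Bool :=
  match keys with
  | [] => false
  | k :: ks => if PySem.Str.isIn k low then true else pvAnyKeyIn ks low

-- outer loop: 'for ln in lines: low = ln.lower(); … return ln / fall through'
def pvFindLoop (lines : List String) (keys : List String) : Option String :=
  match lines with
  | [] => none
  | ln :: rest =>
    let low := PySem.Str.lower ln
    if pvAnyKeyIn keys low then some ln else pvFindLoop rest keys

def find_line_for_key_py (text : String) (keys : List String) : Option String :=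
  let lines := ((PySem.Str.splitlines text).filter
      (fun ln => !(PySem.Str.strip ln == ""))).map PySem.Str.strip
  pvFindLoop lines keys

-- ===== PORT B =====
-- inner loop: 'for i in range(best): if k in lows[i]: best = i; break' — scans the first
-- `bound` entries of lows, index offset i; some j = new best, none = bound unchanged
def pvScan (k : String) (lows : List String) (i : Nat) (bound : Nat) : Option Nat :=
  match lows, bound with
  | _, 0 => none
  | [], _ + 1 => none
  | low :: rest, b + 1 =>
    if PySem.Str.isIn k low then some i else pvScan k rest (i + 1) b

-- outer loop over keys with accumulator best
def pvBestLoop (keys : List String) (lows : List String) (best : Nat) : Nat :=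
  match keys with
  | [] => best
  | k :: ks => pvBestLoop ks lows ((pvScan k lows 0 best).getD best)

def find_line_for_key_py_alt (text : String) (keys : List String) : Option String :=
  let lines := ((PySem.Str.splitlines text).filter
      (fun ln => !(PySem.Str.strip ln == ""))).map PySem.Str.strip
  let lows := lines.map PySem.Str.lower
  let best := pvBestLoop keys lows lines.length
  if best < lines.length then lines[best]? else none

-- ===== PRECONDITION & SPEC =====
def Spec_find_line_for_key_py (text : String) (keys : List String) (out : Option String) : Prop := out = find_line_for_key_py_alt text keys
instance (text : String) (keys : List String) (out : Option String) : Decidable (Spec_find_line_for_key_py text keys out) := by unfold Spec_find_line_for_key_py; infer_instance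

-- ===== CLAIM (what is proved, stated in full; the proofs are below) =====
def Claim_equal_find_line_for_key_py : Prop := ∀ (text : String) (keys : List String), Dom_find_line_for_key_py text keys → Spec_find_line_for_key_py text keys (find_line_for_key_py text keys)

-- ===== LEMMAS AND PROOFS =====

theorem pvAnyKeyIn_eq_any (keys : List String) (low : String) :
    pvAnyKeyIn keys low = keys.any (fun k => PySem.Str.isIn k low) := by
  induction keys with
  | nil => rfl
  | cons k ks ih =>
    simp only [pvAnyKeyIn, List.any_cons, ih]
    cases h : PySem.Str.isIn k low <;> simp [h]

theorem pvFindLoop_eq_find? (lines keys : List String) :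
    pvFindLoop lines keys =
      lines.find? (fun ln => pvAnyKeyIn keys (PySem.Str.lower ln)) := by
  induction lines with
  | nil => rfl
  | cons ln rest ih =>
    simp only [pvFindLoop, List.find?]
    by_cases h : pvAnyKeyIn keys (PySem.Str.lower ln) <;> simp [h, ih]

theorem pvScan_eq (k : String) (lows : List String) :
    ∀ (b i : Nat), pvScan k lows i b =
      if List.findIdx (fun low => PySem.Str.isIn k low) lows < min b lows.length
      then some (i + List.findIdx (fun low => PySem.Str.isIn k low) lows)
      else none := by
  induction lows with
  | nil => intro b i; cases b <;> simp [pvScan]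
  | cons low rest ih =>
    intro b i
    cases b with
    | zero => simp [pvScan]
    | succ b =>
      simp only [pvScan, List.findIdx_cons, List.length_cons]
      by_cases h : PySem.Str.isIn k low
      · rw [if_pos h]
        simp only [h, cond_true]
        rw [if_pos (by omega)]
        simp
      · rw [if_neg h]
        simp only [h, cond_false]
        rw [ih b (i + 1)]
        by_cases hlt : List.findIdx (fun low => PySem.Str.isIn k low) rest < min b rest.length
        · rw [if_pos hlt, if_pos (by omega)]
          congr 1
          omega
        · rw [if_neg hlt, if_neg (by omega)]

theorem pvFindIdx_or (k : String) (ks : List String) (lows : List String) :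
    List.findIdx (fun low => (k :: ks).any (fun k' => PySem.Str.isIn k' low)) lows =
      min (List.findIdx (fun low => PySem.Str.isIn k low) lows)
          (List.findIdx (fun low => ks.any (fun k' => PySem.Str.isIn k' low)) lows) := by
  induction lows with
  | nil => rfl
  | cons low rest ihl =>
    simp only [List.findIdx_cons, List.any_cons]
    simp only [List.any_cons] at ihl
    by_cases h1 : PySem.Str.isIn k low
    · simp only [h1, Bool.true_or, cond_true]
      omega
    · by_cases h2 : ks.any (fun k' => PySem.Str.isIn k' low)
      · simp only [h1, h2, Bool.false_or, cond_true, cond_false]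
        omega
      · simp only [h1, h2, Bool.false_or, cond_false, ihl]
        omega

theorem pvBestLoop_eq (lows : List String) :
    ∀ (keys : List String) (b : Nat), b ≤ lows.length →
      pvBestLoop keys lows b =
        min b (List.findIdx (fun low => keys.any (fun k => PySem.Str.isIn k low)) lows) := by
  intro keys
  induction keys with
  | nil =>
    intro b hb
    simp only [pvBestLoop, List.any_nil]
    rw [List.findIdx_eq_length_of_false (by intro x _; rfl)]
    omega
  | cons k ks ih =>
    intro b hb
    have hidx : List.findIdx (fun low => PySem.Str.isIn k low) lows ≤ lows.length :=
      List.findIdx_le_length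
    have hstep : (pvScan k lows 0 b).getD b =
        min b (List.findIdx (fun low => PySem.Str.isIn k low) lows) := by
      rw [pvScan_eq]
      by_cases h : List.findIdx (fun low => PySem.Str.isIn k low) lows < min b lows.length
      · rw [if_pos h]; simp only [Option.getD_some]; omega
      · rw [if_neg h]; simp only [Option.getD_none]; omega
    simp only [pvBestLoop]
    rw [hstep, ih _ (by omega), pvFindIdx_or]
    omega

theorem pvMain (lines keys : List String) :
    pvFindLoop lines keys =
      (if pvBestLoop keys (lines.map PySem.Str.lower) lines.length < lines.length
       then lines[pvBestLoop keys (lines.map PySem.Str.lower) lines.length]? else none) := by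
  rw [pvFindLoop_eq_find?, List.find?_eq_getElem?_findIdx]
  rw [pvBestLoop_eq (lines.map PySem.Str.lower) keys lines.length (by simp)]
  rw [List.findIdx_map]
  have hle : List.findIdx
      ((fun low => keys.any (fun k => PySem.Str.isIn k low)) ∘ PySem.Str.lower)
      lines ≤ lines.length := List.findIdx_le_length
  rw [Nat.min_eq_right hle]
  have hpred : (fun ln => pvAnyKeyIn keys (PySem.Str.lower ln)) =
      ((fun low => keys.any (fun k => PySem.Str.isIn k low)) ∘ PySem.Str.lower) := by
    funext ln; exact pvAnyKeyIn_eq_any keys (PySem.Str.lower ln)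
  rw [hpred]
  by_cases h : List.findIdx
      ((fun low => keys.any (fun k => PySem.Str.isIn k low)) ∘ PySem.Str.lower)
      lines < lines.length
  · rw [if_pos h]
  · rw [if_neg h]
    exact List.getElem?_eq_none (by omega)

-- ===== VERDICT (by name: the statement is the Claim_ definition above) =====
theorem find_line_for_key_py_spec : Claim_equal_find_line_for_key_py := by
  intro text keys _
  unfold Spec_find_line_for_key_py
  exact pvMain _ keys
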